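-- pv_equiv track=rewrite | github.com/Purefekt/leetcode | 3. Longest Substring Without Repeating Characters/sliding_withdow_my_sol.py | repeating
-- ===== SOURCE A (Python) =====
-- def repeating(s, l, r):
--     count_dict = {}
--
--     substring = s[l:r+1]
--     for c in substring:
--         if c not in count_dict.keys():
--             count_dict[c] = 1
--         else:
--             return True
--
--     return False
-- ===== SOURCE B (Python) =====
-- def repeating(s, l, r):
--     t = sorted(s[l:r+1])
--     return any(a == b for a, b in zip(t, t[1:]))
-- ===== Notes on version B (the rewrite author's own statement) =====
-- stated objective: alternative
-- what changed: Replaces A's hash-based scan (dict of seen chars with early return) by a comparison-based strategy: sort the substring and test whether any adjacent pair is equal.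
import Mathlib
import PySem

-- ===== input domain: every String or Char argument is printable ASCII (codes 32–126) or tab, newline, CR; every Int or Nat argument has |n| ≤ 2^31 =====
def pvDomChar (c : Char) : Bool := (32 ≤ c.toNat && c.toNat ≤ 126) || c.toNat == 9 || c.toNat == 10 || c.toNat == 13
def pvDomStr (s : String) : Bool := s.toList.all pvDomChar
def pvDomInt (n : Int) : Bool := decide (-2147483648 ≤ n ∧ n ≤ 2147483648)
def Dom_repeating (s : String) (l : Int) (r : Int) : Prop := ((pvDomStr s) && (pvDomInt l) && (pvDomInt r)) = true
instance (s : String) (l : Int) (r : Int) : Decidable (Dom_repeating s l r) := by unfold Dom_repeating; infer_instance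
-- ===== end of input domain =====

-- B replaces A's hash-based scan (dict of seen chars, early return) by sorting the substring and testing adjacent pairs for equality; same value everywhere.

-- ===== PORT A =====
-- the for-loop over the substring, carrying count_dict; early 'return True' on a repeated char
def repeatingLoop : List Char → PySem.Dict Char Int → Bool
  | [], _ => false
  | c :: cs, d =>
    if ¬ (c ∈ d.keys) then repeatingLoop cs (d.insert c 1)
    else true

def repeating (s : String) (l : Int) (r : Int) : Bool :=
  let substring := PySem.List.slice s.toList (some l) (some (r + 1))
  repeatingLoop substring PySem.Dict.empty

-- ===== PORT B =====
def repeating_alt (s : String) (l : Int) (r : Int) : Bool :=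
  let t := PySem.List.sorted (s.toList |> fun xs => PySem.List.slice xs (some l) (some (r + 1))) (fun c => c) false
  (t.zip t.tail).any (fun p => p.1 == p.2)

-- ===== PRECONDITION & SPEC =====
def Spec_repeating (s : String) (l : Int) (r : Int) (out : Bool) : Prop := out = repeating_alt s l r
instance (s : String) (l : Int) (r : Int) (out : Bool) : Decidable (Spec_repeating s l r out) := by unfold Spec_repeating; infer_instance

-- ===== CLAIM =====
def Claim_equal_repeating : Prop := ∀ (s : String) (l : Int) (r : Int), Dom_repeating s l r → Spec_repeating s l r (repeating s l r)

-- ===== LEMMAS AND PROOFS =====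

-- A's loop returns False exactly when the chars are pairwise distinct and none is already a key
theorem repeatingLoop_false_iff (xs : List Char) :
    ∀ d : PySem.Dict Char Int,
      repeatingLoop xs d = false ↔ xs.Nodup ∧ ∀ c ∈ xs, c ∉ d.keys := by
  induction xs with
  | nil => intro d; simp [repeatingLoop]
  | cons c cs ih =>
    intro d
    by_cases hc : c ∈ d.keys
    · simp [repeatingLoop, hc]
    · rw [repeatingLoop]
      simp only [hc, not_false_iff, if_pos, ih, List.nodup_cons, List.mem_cons]
      constructor
      · rintro ⟨hnd, hall⟩
        have hcns : c ∉ cs := fun hmem => by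
          have := hall c hmem
          simp [PySem.Dict.mem_keys_insert] at this
        refine ⟨⟨hcns, hnd⟩, ?_⟩
        rintro x (rfl | hx)
        · exact hc
        · have := hall x hx
          simp [PySem.Dict.mem_keys_insert] at this
          exact this.2
      · rintro ⟨⟨hcns, hnd⟩, hall⟩
        refine ⟨hnd, fun x hx => ?_⟩
        simp only [PySem.Dict.mem_keys_insert]
        push Not
        exact ⟨fun h => hcns (h ▸ hx), hall x (Or.inr hx)⟩

-- adjacent-pair scan on a ≤-sorted list detects exactly the duplicates
theorem adj_any_eq_false_iff (t : List Char) (hs : t.Pairwise (· ≤ ·)) :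
    ((t.zip t.tail).any (fun p => p.1 == p.2)) = false ↔ t.Nodup := by
  induction t with
  | nil => simp
  | cons a t ih =>
    cases t with
    | nil => simp
    | cons b rest =>
      have hab : a ≤ b := (List.pairwise_cons.mp hs).1 b (List.mem_cons_self ..)
      have hs' : (b :: rest).Pairwise (· ≤ ·) := (List.pairwise_cons.mp hs).2
      by_cases hEq : a = b
      · subst hEq
        simp [List.zip, List.Nodup]
      · have hlt : a < b := lt_of_le_of_ne hab hEq
        have hnot : a ∉ b :: rest := by
          intro hmem
          rcases List.mem_cons.mp hmem with rfl | hx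
          · exact hEq rfl
          · have hbx : b ≤ a := (List.pairwise_cons.mp hs').1 a hx
            exact absurd (lt_of_lt_of_le hlt hbx) (lt_irrefl a)
        have := ih hs'
        simp only [List.tail_cons, List.zip_cons_cons, List.any_cons, Bool.or_eq_false_iff,
          beq_eq_false_iff_ne, ne_eq, List.nodup_cons] at this ⊢
        constructor
        · rintro ⟨_, h2⟩
          exact ⟨hnot, this.mp h2⟩
        · rintro ⟨_, h2⟩
          exact ⟨hEq, this.mpr h2⟩

-- the two tests agree on any char list
theorem key_lemma (xs : List Char) :
    repeatingLoop xs PySem.Dict.empty =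
      (let t := PySem.List.sorted xs (fun c => c) false
       (t.zip t.tail).any (fun p => p.1 == p.2)) := by
  set t := PySem.List.sorted xs (fun c => c) false with ht
  have hperm : t.Perm xs := PySem.List.sorted_perm ..
  have hpw : t.Pairwise (· ≤ ·) := PySem.List.sorted_pairwise ..
  have hA : repeatingLoop xs PySem.Dict.empty = false ↔ xs.Nodup := by
    rw [repeatingLoop_false_iff]
    simp [PySem.Dict.keys_empty]
  have hB : ((t.zip t.tail).any (fun p => p.1 == p.2)) = false ↔ xs.Nodup := by
    rw [adj_any_eq_false_iff t hpw]
    exact hperm.nodup_iff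
  by_cases hn : xs.Nodup
  · simp only [hA.mpr hn, hB.mpr hn]
  · have h1 : repeatingLoop xs PySem.Dict.empty ≠ false := fun h => hn (hA.mp h)
    have h2 : ((t.zip t.tail).any (fun p => p.1 == p.2)) ≠ false := fun h => hn (hB.mp h)
    simp only [Bool.ne_false_iff.mp h1, Bool.ne_false_iff.mp h2]

-- ===== VERDICT =====
theorem repeating_spec : Claim_equal_repeating := by
  intro s l r _
  unfold Spec_repeating repeating repeating_alt
  exact key_lemma _
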